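-- pv_equiv track=rewrite | github.com/mitchellgoffpc/zen-lang | zen/transforms/case.py | recase
-- ===== SOURCE A (Python) =====
-- def recase(value, first):
--     i = 0
--
--     while i < len(value):
--         if value[i] == '-':
--             if first and i < len(value) - 1:
--                 value = value[:i] + value[i+1].upper() + value[i+2:]
--             else:
--                 value = value[:i] + '_' + value[i+1:]
--             i = 0
--         i += 1
--
--     return value
-- ===== SOURCE B (Python) =====
-- def recase(value, first):
--     if not first:
--         return ''.join('_' if c == '-' else c for c in value)
--     out = []
--     cap = False
--     for c in value:
--         if c == '-':
--             cap = True
--         elif cap: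
--             out.append(c.upper())
--             cap = False
--         else:
--             out.append(c)
--     if cap:
--         out.append('_')
--     return ''.join(out)
-- ===== Notes on version B (the rewrite author's own statement) =====
-- stated objective: faster
-- what changed: A repeatedly re-slices the string and rescans it from the start after every edit; B is a single left-to-right pass carrying a pending-dash flag for the camel branch and a plain per-character substitution for the snake branch.
-- intended difference: On strings starting with two dashes with first true, A returns the string with an orphaned leading '-' (its restart index 1 never revisits position 0), e.g. A('--a', True) = '-a', while B returns the fully collapsed camel form 'A', which is the intended value. — e.g. on recase("--a", true): A returns "-a", B returns "A"
import Mathlib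
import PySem

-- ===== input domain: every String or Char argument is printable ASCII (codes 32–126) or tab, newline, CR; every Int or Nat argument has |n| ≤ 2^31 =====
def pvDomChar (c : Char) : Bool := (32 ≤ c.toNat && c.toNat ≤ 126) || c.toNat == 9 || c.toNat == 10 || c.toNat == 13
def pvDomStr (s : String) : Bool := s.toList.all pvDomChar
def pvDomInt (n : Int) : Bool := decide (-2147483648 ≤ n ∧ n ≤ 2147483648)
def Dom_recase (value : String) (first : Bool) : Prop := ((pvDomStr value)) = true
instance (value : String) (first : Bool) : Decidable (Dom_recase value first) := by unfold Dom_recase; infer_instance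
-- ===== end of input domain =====

-- B replaces A's rescan-after-every-edit loop by one left-to-right pass with a pending-dash flag;
-- on strings starting with "--" with first true, A orphans the leading dash and B returns the collapsed form (see D_recase).

-- termination helper for port A: .upper() of a single char is '-' only for '-' itself
theorem upperChar_eq_dash {c : Char} (h : PySem.Chars.upperChar c = '-') : c = '-' := by
  unfold PySem.Chars.upperChar PySem.Chars.islower at h
  split_ifs at h with hl
  · exfalso
    simp only [Bool.and_eq_true, decide_eq_true_eq] at hl
    have h1 : 97 ≤ c.toNat := Nat.succ_le_of_lt hl.1
    have h2 : c.toNat ≤ 122 := Nat.lt_succ_iff.mp (Nat.lt_succ_of_le hl.2)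
    have hdec : ∀ n : Nat, n < 128 → 65 ≤ n → n ≤ 90 → Char.ofNat n ≠ '-' := by decide
    exact hdec (c.toNat - 32) (by omega) (by omega) (by omega) h
  · exact h

-- termination helper for port A: replacing a char by its .upper() never adds a dash
theorem count_upper_ite (x : Char) :
    List.count '-' [PySem.Chars.upperChar x] ≤ if x = '-' then 1 else 0 := by
  by_cases hu : PySem.Chars.upperChar x = '-'
  · have hx2 : x = '-' := upperChar_eq_dash hu
    subst hx2
    decide
  · have h0 : List.count '-' [PySem.Chars.upperChar x] = 0 := by
      rw [List.count_eq_zero]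
      simp only [List.mem_singleton]
      exact fun hEq => hu hEq.symm
    simp [h0]

-- termination facts for port A, kept as standalone lemmas (the loop cites them by name)
theorem recase_dec1 (value : List Char) (i : Nat) (h : i < value.length)
    (hx : i + 1 < value.length) (hc : value[i] = '-') :
    List.count '-' (value.take i ++ [PySem.Chars.upperChar (value[i+1]'hx)] ++ value.drop (i+2))
      < List.count '-' value := by
  have e0 := List.take_append_drop i value
  have e1 : List.count '-' value
      = List.count '-' (value.take i) + List.count '-' (value.drop i) := by
    conv_lhs => rw [← e0]
    rw [List.count_append]
  have e2 : value.drop i = value[i] :: value.drop (i+1) := List.drop_eq_getElem_cons h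
  have e3 : value.drop (i+1) = value[i+1] :: value.drop (i+2) := List.drop_eq_getElem_cons hx
  have e4 : List.count '-' (value.drop i) = List.count '-' (value.drop (i+1)) + 1 := by
    rw [e2, hc]
    simp [List.count_cons]
  have e5 : List.count '-' (value.drop (i+1))
      = List.count '-' (value.drop (i+2)) + (if value[i+1]'hx = '-' then 1 else 0) := by
    rw [e3, List.count_cons]
    congr 1
    simp only [beq_iff_eq]
  have e7 := count_upper_ite (value[i+1]'hx)
  rw [e1, e4, e5, List.count_append, List.count_append]
  omega

theorem recase_dec2 (value : List Char) (i : Nat) (h : i < value.length)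
    (hc : value[i] = '-') :
    List.count '-' (value.take i ++ ['_'] ++ value.drop (i+1)) < List.count '-' value := by
  have e0 := List.take_append_drop i value
  have e1 : List.count '-' value
      = List.count '-' (value.take i) + List.count '-' (value.drop i) := by
    conv_lhs => rw [← e0]
    rw [List.count_append]
  have e2 : value.drop i = value[i] :: value.drop (i+1) := List.drop_eq_getElem_cons h
  have e4 : List.count '-' (value.drop i) = List.count '-' (value.drop (i+1)) + 1 := by
    rw [e2, hc]
    simp [List.count_cons]
  have e6 : List.count '-' ['_'] = 0 := by decide
  rw [e1, e4, List.count_append, List.count_append, e6]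
  omega

theorem recase_dec3 (a i : Nat) (h : i < a) : a - (i + 1) < a - i := by omega

-- ===== PORT A =====
-- A's while loop mutates 'value' and restarts at i = 0; i += 1 (i.e. 1) after each edit; ported as
-- well-founded recursion on (number of '-' left, remaining indices).  Python's nonnegative in-range
-- slices value[:i] / value[i+1:] / value[i+2:] are exactly List.take / List.drop here, and
-- value[i+1].upper() on a single character is PySem.Chars.upperChar (exact).
def recaseLoop (first : Bool) (value : List Char) (i : Nat) : List Char :=
  if h : i < value.length then
    if hc : value[i] = '-' then
      if hf : first = true ∧ i < value.length - 1 then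
        recaseLoop first
          (value.take i ++ [PySem.Chars.upperChar (value[i+1]'(Nat.add_lt_of_lt_sub hf.2))]
            ++ value.drop (i+2)) 1
      else
        recaseLoop first (value.take i ++ ['_'] ++ value.drop (i+1)) 1
    else
      recaseLoop first value (i+1)
  else value
termination_by (List.count '-' value, value.length - i)
decreasing_by
  · exact Prod.Lex.left _ _ (recase_dec1 value i h (Nat.add_lt_of_lt_sub hf.2) hc)
  · exact Prod.Lex.left _ _ (recase_dec2 value i h hc)
  · exact Prod.Lex.right _ (recase_dec3 value.length i h)

def recase (value : String) (first : Bool) : String :=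
  String.ofList (recaseLoop first value.toList 0)

-- ===== PORT B =====
-- one pass: 'cap' records a pending dash run; the final flush turns a trailing run into '_'
def recase_alt (value : String) (first : Bool) : String :=
  if !first then
    String.ofList (value.toList.map (fun c => if c = '-' then '_' else c))
  else
    let st := value.toList.foldl
      (fun (s : List Char × Bool) c =>
        if c = '-' then (s.1, true)
        else if s.2 then (s.1 ++ [PySem.Chars.upperChar c], false)
        else (s.1 ++ [c], false)) ([], false)
    String.ofList (if st.2 then st.1 ++ ['_'] else st.1)

-- ===== PRECONDITION & SPEC =====
-- On strings starting with two dashes with first true, A returns the string with an orphaned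
-- leading '-' (its restart index 1 never revisits position 0), e.g. A "--a" true = "-a";
-- B returns the fully collapsed camel form "A", which is the intended value.
def D_recase (value : String) (first : Bool) : Prop :=
  first = true ∧ value.toList.take 2 = ['-', '-']
instance (value : String) (first : Bool) : Decidable (D_recase value first) := by
  unfold D_recase; infer_instance

def Spec_recase (value : String) (first : Bool) (out : String) : Prop :=
  ¬ D_recase value first → out = recase_alt value first
instance (value : String) (first : Bool) (out : String) : Decidable (Spec_recase value first out) := by
  unfold Spec_recase; infer_instance

def pvDiffWitness_recase : String × Bool := ("--a", true)
def pvDiffWitnessOut_recase : String × String := ("-a", "A")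

-- ===== CLAIM (what is proved, stated in full; the proofs are below) =====
def Claim_unchanged_recase : Prop := ∀ (value : String) (first : Bool), Dom_recase value first → Spec_recase value first (recase value first)
def Claim_changed_recase : Prop := Dom_recase (pvDiffWitness_recase.1) (pvDiffWitness_recase.2) ∧ D_recase (pvDiffWitness_recase.1) (pvDiffWitness_recase.2) ∧ recase (pvDiffWitness_recase.1) (pvDiffWitness_recase.2) = pvDiffWitnessOut_recase.1 ∧ recase_alt (pvDiffWitness_recase.1) (pvDiffWitness_recase.2) = pvDiffWitnessOut_recase.2 ∧ pvDiffWitnessOut_recase.1 ≠ pvDiffWitnessOut_recase.2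
def Claim_exact_recase : Prop := ∀ (value : String) (first : Bool), Dom_recase value first → D_recase value first → recase value first ≠ recase_alt value first

-- ===== LEMMAS AND PROOFS =====

theorem upperChar_ne_dash {c : Char} (h : c ≠ '-') : PySem.Chars.upperChar c ≠ '-' :=
  fun he => h (upperChar_eq_dash he)

-- proof-side model of B's camel pass
def goB (cap : Bool) : List Char → List Char
  | [] => if cap then ['_'] else []
  | c :: r =>
    if c = '-' then goB true r
    else if cap then PySem.Chars.upperChar c :: goB false r
    else c :: goB false r

def modelAlt (first : Bool) (w : List Char) : List Char :=
  if first then goB false w else w.map (fun c => if c = '-' then '_' else c)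

theorem foldl_goB (w : List Char) : ∀ (acc : List Char) (cap : Bool),
    (if (w.foldl
      (fun (s : List Char × Bool) c =>
        if c = '-' then (s.1, true)
        else if s.2 then (s.1 ++ [PySem.Chars.upperChar c], false)
        else (s.1 ++ [c], false)) (acc, cap)).2
     then (w.foldl
      (fun (s : List Char × Bool) c =>
        if c = '-' then (s.1, true)
        else if s.2 then (s.1 ++ [PySem.Chars.upperChar c], false)
        else (s.1 ++ [c], false)) (acc, cap)).1 ++ ['_']
     else (w.foldl
      (fun (s : List Char × Bool) c =>
        if c = '-' then (s.1, true)
        else if s.2 then (s.1 ++ [PySem.Chars.upperChar c], false)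
        else (s.1 ++ [c], false)) (acc, cap)).1) = acc ++ goB cap w := by
  induction w with
  | nil => intro acc cap; cases cap <;> simp [goB]
  | cons c r ih =>
    intro acc cap
    by_cases hc : c = '-'
    · subst hc
      simpa [goB] using ih acc true
    · cases cap
      · simpa [goB, hc, List.append_assoc] using ih (acc ++ [c]) false
      · simpa [goB, hc, List.append_assoc] using ih (acc ++ [PySem.Chars.upperChar c]) false

theorem alt_eq_model (value : String) (first : Bool) :
    recase_alt value first = String.ofList (modelAlt first value.toList) := by
  cases first
  · simp [recase_alt, modelAlt]
  · simp [recase_alt, modelAlt, foldl_goB]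

theorem loop_exit (first : Bool) (v : List Char) (i : Nat) (h : v.length ≤ i) :
    recaseLoop first v i = v := by
  unfold recaseLoop
  simp [Nat.not_lt.2 h]

theorem loop_step_nondash (first : Bool) (v : List Char) (i : Nat) (h : i < v.length)
    (hc : v[i] ≠ '-') : recaseLoop first v i = recaseLoop first v (i+1) := by
  conv_lhs => rw [recaseLoop]
  simp [h, hc]

-- positional facts about c :: (p ++ w) used to evaluate one loop iteration
theorem get_after1 (c x : Char) (p w : List Char)
    (h : p.length + 1 < (c :: (p ++ (x :: w))).length) :
    (c :: (p ++ (x :: w)))[p.length + 1]'h = x := by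
  have h1 : c :: (p ++ (x :: w)) = (c :: p) ++ (x :: w) := by simp
  rw [List.getElem_of_eq h1, List.getElem_append_right (by simp)]
  simp

theorem get_after2 (c x y : Char) (p w : List Char)
    (h : p.length + 1 + 1 < (c :: (p ++ (x :: y :: w))).length) :
    (c :: (p ++ (x :: y :: w)))[p.length + 1 + 1]'h = y := by
  have h1 : c :: (p ++ (x :: y :: w)) = ((c :: p) ++ [x]) ++ (y :: w) := by simp
  rw [List.getElem_of_eq h1, List.getElem_append_right (by simp)]
  simp

theorem take_after (c : Char) (p w : List Char) :
    (c :: (p ++ w)).take (p.length + 1) = c :: p := by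
  have h1 : c :: (p ++ w) = (c :: p) ++ w := by simp
  rw [h1, show p.length + 1 = (c :: p).length by simp, List.take_left]

theorem drop_after1 (c x : Char) (p w : List Char) :
    (c :: (p ++ (x :: w))).drop (p.length + 1 + 1) = w := by
  have h1 : c :: (p ++ (x :: w)) = ((c :: p) ++ [x]) ++ w := by simp
  rw [h1, show p.length + 1 + 1 = ((c :: p) ++ [x]).length by simp, List.drop_left]

theorem drop_after2 (c x y : Char) (p w : List Char) :
    (c :: (p ++ (x :: y :: w))).drop (p.length + 1 + 2) = w := by
  have h1 : c :: (p ++ (x :: y :: w)) = ((c :: p) ++ [x, y]) ++ w := by simp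
  rw [h1, show p.length + 1 + 2 = ((c :: p) ++ [x, y]).length by simp, List.drop_left]

theorem loop_walk (first : Bool) : ∀ (p u w : List Char), (∀ x ∈ p, x ≠ '-') →
    recaseLoop first (u ++ (p ++ w)) u.length
      = recaseLoop first (u ++ (p ++ w)) (u.length + p.length) := by
  intro p
  induction p with
  | nil => intro u w _; simp
  | cons a p' ih =>
    intro u w hp
    have ha : a ≠ '-' := hp a (List.mem_cons_self)
    have hlen : u.length < (u ++ (a :: p' ++ w)).length := by simp
    have hget : (u ++ (a :: p' ++ w))[u.length]'hlen = a := by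
      rw [List.getElem_append_right (le_refl _)]
      simp
    rw [loop_step_nondash first _ u.length hlen (by rw [hget]; exact ha)]
    have hre : u ++ (a :: p' ++ w) = (u ++ [a]) ++ (p' ++ w) := by simp
    have h2 := ih (u ++ [a]) w (fun x hx => hp x (List.mem_cons_of_mem _ hx))
    rw [hre]
    rw [show u.length + (a :: p').length = u.length + 1 + p'.length by simp; omega]
    rw [show u.length + 1 = (u ++ [a]).length by simp]
    exact h2

theorem loop_restart (first : Bool) (c : Char) (p w : List Char) (hp : ∀ x ∈ p, x ≠ '-') :
    recaseLoop first (c :: (p ++ w)) 1 = recaseLoop first (c :: (p ++ w)) (1 + p.length) := by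
  simpa using loop_walk first p [c] w hp

theorem modelAlt_cons_nondash (first : Bool) (d : Char) (w : List Char) (hd : d ≠ '-') :
    modelAlt first (d :: w) = d :: modelAlt first w := by
  cases first <;> simp [modelAlt, goB, hd]

theorem goB_dash_collapse (e : Char) (w : List Char) :
    goB false ('-' :: e :: w) = goB false (PySem.Chars.upperChar e :: w) := by
  by_cases he : e = '-'
  · subst he
    have h1 : PySem.Chars.upperChar '-' = '-' := by decide
    simp [goB, h1]
  · simp [goB, he, upperChar_ne_dash he]

theorem modelAlt_collapse (e : Char) (w : List Char) :
    modelAlt true ('-' :: e :: w) = modelAlt true (PySem.Chars.upperChar e :: w) := by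
  simp only [modelAlt, if_pos rfl]
  have : goB false ('-' :: e :: w) = goB false (PySem.Chars.upperChar e :: w) :=
    goB_dash_collapse e w
  exact this

theorem loop_main (first : Bool) (n : Nat) : ∀ (w : List Char), w.length ≤ n →
    ∀ (c : Char) (p : List Char), (∀ x ∈ p, x ≠ '-') →
    recaseLoop first (c :: (p ++ w)) (p.length + 1) = c :: (p ++ modelAlt first w) := by
  induction n with
  | zero =>
    intro w hw c p hp
    have hnil : w = [] := List.length_eq_zero_iff.mp (by omega)
    subst hnil
    rw [loop_exit first _ _ (by simp)]
    cases first <;> simp [modelAlt, goB]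
  | succ n ih =>
    intro w hw c p hp
    match w with
    | [] =>
      rw [loop_exit first _ _ (by simp)]
      cases first <;> simp [modelAlt, goB]
    | d :: w' =>
      by_cases hd : d = '-'
      · subst hd
        have hlen : p.length + 1 < (c :: (p ++ ('-' :: w'))).length := by
          simp only [List.length_cons, List.length_append]; omega
        conv_lhs => rw [recaseLoop]
        rw [dif_pos hlen, dif_pos (get_after1 c '-' p w' hlen)]
        by_cases hf : first = true ∧ p.length + 1 < (c :: (p ++ ('-' :: w'))).length - 1
        · rw [dif_pos hf]
          match w' with
          | [] =>
            exfalso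
            simp only [List.length_cons, List.length_append, List.length_nil] at hf
            omega
          | e :: w'' =>
            rw [get_after2 c '-' e p w'' (by simp only [List.length_cons, List.length_append]; omega)]
            rw [take_after, drop_after2]
            rw [show (c :: p) ++ [PySem.Chars.upperChar e] ++ w''
                = c :: (p ++ (PySem.Chars.upperChar e :: w'')) by simp]
            rw [loop_restart first c p _ hp]
            rw [show 1 + p.length = p.length + 1 from Nat.add_comm 1 p.length]
            rw [ih (PySem.Chars.upperChar e :: w'') (by
              simp only [List.length_cons] at hw ⊢; omega) c p hp]
            have hfirst : first = true := hf.1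
            subst hfirst
            rw [modelAlt_collapse]
        · rw [dif_neg hf]
          rw [take_after, drop_after1]
          rw [show (c :: p) ++ ['_'] ++ w' = c :: ((p ++ ['_']) ++ w') by simp]
          have hp' : ∀ x ∈ p ++ ['_'], x ≠ '-' := by
            intro x hx
            rcases List.mem_append.mp hx with h1 | h1
            · exact hp x h1
            · simp only [List.mem_singleton] at h1
              subst h1
              decide
          rw [loop_restart first c (p ++ ['_']) w' hp']
          rw [show 1 + (p ++ ['_']).length = (p ++ ['_']).length + 1 from Nat.add_comm _ _]
          rw [ih w' (by simp only [List.length_cons] at hw; omega) c (p ++ ['_']) hp']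
          rcases Decidable.not_and_iff_not_or_not.mp hf with h1 | h1
          · have hfalse : first = false := by
              cases first
              · rfl
              · exact absurd rfl h1
            subst hfalse
            simp [modelAlt]
          · have hw' : w' = [] := by
              by_contra hne
              have hpos : 0 < w'.length := List.length_pos_of_ne_nil hne
              simp only [List.length_cons, List.length_append, List.length_nil] at h1
              omega
            subst hw'
            cases first <;> simp [modelAlt, goB]
      · have hlen : p.length + 1 < (c :: (p ++ (d :: w'))).length := by
          simp only [List.length_cons, List.length_append]; omega
        rw [loop_step_nondash first _ _ hlen (by
          intro hEq
          rw [get_after1 c d p w' hlen] at hEq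
          exact hd hEq)]
        have hp' : ∀ x ∈ p ++ [d], x ≠ '-' := by
          intro x hx
          rcases List.mem_append.mp hx with h1 | h1
          · exact hp x h1
          · simp only [List.mem_singleton] at h1
            subst h1
            exact hd
        rw [show c :: (p ++ (d :: w')) = c :: ((p ++ [d]) ++ w') by simp]
        rw [show p.length + 1 + 1 = (p ++ [d]).length + 1 by simp]
        rw [ih w' (by simp only [List.length_cons] at hw; omega) c (p ++ [d]) hp']
        rw [modelAlt_cons_nondash first d w' hd]
        simp

theorem loop_main1 (first : Bool) (c : Char) (w : List Char) :
    recaseLoop first (c :: w) 1 = c :: modelAlt first w := by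
  simpa using loop_main first w.length w (le_refl _) c [] (by simp)

theorem loopA_D (w : List Char) :
    recaseLoop true ('-' :: '-' :: w) 0 = '-' :: modelAlt true w := by
  conv_lhs => rw [recaseLoop]
  rw [dif_pos (by simp : (0:Nat) < ('-' :: '-' :: w).length)]
  simp only [List.getElem_cons_succ, List.getElem_cons_zero]
  rw [dif_pos True.intro]
  rw [dif_pos ⟨True.intro, by simp only [List.length_cons]; omega⟩]
  rw [show PySem.Chars.upperChar '-' = '-' from by decide]
  rw [show List.take 0 ('-' :: '-' :: w) ++ ['-'] ++ List.drop (0+2) ('-' :: '-' :: w)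
      = '-' :: w from by simp]
  exact loop_main1 true '-' w

theorem loop_zero (first : Bool) (v : List Char)
    (hD : ¬(first = true ∧ v.take 2 = ['-', '-'])) :
    recaseLoop first v 0 = modelAlt first v := by
  match v with
  | [] =>
    rw [loop_exit first [] 0 (by simp)]
    cases first <;> simp [modelAlt, goB]
  | c :: rest =>
    by_cases hc : c = '-'
    · subst hc
      conv_lhs => rw [recaseLoop]
      rw [dif_pos (by simp : (0:Nat) < ('-' :: rest).length)]
      simp only [List.getElem_cons_zero]
      rw [dif_pos True.intro]
      by_cases hf : first = true ∧ (0:Nat) < ('-' :: rest).length - 1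
      · rw [dif_pos hf]
        have hfirst : first = true := hf.1
        subst hfirst
        match rest with
        | [] =>
          exfalso
          simp only [List.length_cons, List.length_nil] at hf
          omega
        | e :: w =>
          have he : e ≠ '-' := by
            intro hEq
            subst hEq
            exact hD ⟨rfl, by simp⟩
          simp only [List.getElem_cons_succ, List.getElem_cons_zero]
          rw [show List.take 0 ('-' :: e :: w) ++ [PySem.Chars.upperChar e]
              ++ List.drop (0+2) ('-' :: e :: w) = PySem.Chars.upperChar e :: w from by simp]
          rw [loop_main1 true (PySem.Chars.upperChar e) w]
          simp [modelAlt, goB, he, upperChar_ne_dash he]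
      · rw [dif_neg hf]
        rw [show List.take 0 ('-' :: rest) ++ ['_'] ++ List.drop (0+1) ('-' :: rest)
            = '_' :: rest from by simp]
        rw [loop_main1 first '_' rest]
        rcases Decidable.not_and_iff_not_or_not.mp hf with h1 | h1
        · have hfalse : first = false := by
            cases first
            · rfl
            · exact absurd rfl h1
          subst hfalse
          simp [modelAlt]
        · have hrest : rest = [] := by
            by_contra hne
            have hpos : 0 < rest.length := List.length_pos_of_ne_nil hne
            simp only [List.length_cons] at h1
            omega
          subst hrest
          cases first <;> simp [modelAlt, goB]
    · rw [loop_step_nondash first (c :: rest) 0 (by simp) (by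
        intro hEq
        simp only [List.getElem_cons_zero] at hEq
        exact hc hEq)]
      rw [loop_main1 first c rest]
      rw [modelAlt_cons_nondash first c rest hc]

theorem goB_true_head (w : List Char) : ∃ d r, goB true w = d :: r ∧ d ≠ '-' := by
  induction w with
  | nil => exact ⟨'_', [], rfl, by decide⟩
  | cons c r ih =>
    by_cases hc : c = '-'
    · subst hc
      simpa [goB] using ih
    · exact ⟨PySem.Chars.upperChar c, goB false r, by simp [goB, hc], upperChar_ne_dash hc⟩

theorem ofList_inj {a b : List Char} (h : String.ofList a = String.ofList b) : a = b := by
  simpa using congrArg String.toList h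

-- ===== VERDICT (by name: the statement is the Claim_ definition above) =====
theorem recase_spec : Claim_unchanged_recase := by
  intro value first _
  unfold Spec_recase
  intro hD
  unfold D_recase at hD
  show String.ofList (recaseLoop first value.toList 0) = recase_alt value first
  rw [alt_eq_model, loop_zero first value.toList hD]

theorem recase_changed : Claim_changed_recase := by
  unfold Claim_changed_recase
  refine ⟨by decide, by decide, ?_, by decide, by decide⟩
  show recase "--a" true = "-a"
  show String.ofList (recaseLoop true ("--a" : String).toList 0) = "-a"
  rw [show ("--a" : String).toList = ['-', '-', 'a'] from by decide]
  rw [loopA_D ['a']]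
  decide

theorem recase_tight : Claim_exact_recase := by
  intro value first _ hD
  obtain ⟨hfirst, htake⟩ := hD
  subst hfirst
  intro heq
  match hv : value.toList with
  | [] => rw [hv] at htake; simp at htake
  | [x] => rw [hv] at htake; simp at htake
  | x :: y :: w =>
    rw [hv] at htake
    have htake' : [x, y] = ['-', '-'] := htake
    simp only [List.cons.injEq, and_true] at htake'
    obtain ⟨hx, hy⟩ := htake' 
    subst hx
    subst hy
    rw [alt_eq_model] at heq
    have hlist : recaseLoop true value.toList 0 = modelAlt true value.toList :=
      ofList_inj heq
    rw [hv, loopA_D] at hlist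
    have hB : modelAlt true ('-' :: '-' :: w) = goB true w := by
      simp [modelAlt, goB]
    rw [hB] at hlist
    obtain ⟨d, r, hgo, hnd⟩ := goB_true_head w
    rw [hgo] at hlist
    have hhead : '-' = d := by
      injection hlist with h1 _
    exact hnd hhead.symm
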